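-- pv_equiv track=rewrite | github.com/StanfordHCI/lattice | src/lattice/Lattice.py | _split_by_session
-- ===== SOURCE A (Python) =====
-- def _split_by_session(nodes: list, session_number: int) -> list:
--     """
--     Sort nodes by metadata["input_session"], group them into per-session
--     buckets, then chunk those buckets into groups of *session_number*.
--
--     Args:
--         nodes: List of node dicts, each with metadata["input_session"] as
--                an integer session identifier.
--         session_number: How many sessions to merge into each output group.
--                         1 → each session is its own group.
--                         2 → every two consecutive sessions form one group.
--
--     Returns:
--         List of lists ordered by session; each inner list contains all
--         nodes belonging to that chunk of sessions.
--     """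
--     if session_number < 1:
--         raise ValueError(f"session_number must be >= 1; got {session_number}.")
--
--     missing = [i for i, n in enumerate(nodes) if "input_session" not in n.get("metadata", {})]
--     if missing:
--         raise ValueError(f"Nodes at indices {missing} are missing 'input_session' in metadata.")
--
--     sorted_nodes = sorted(nodes, key=lambda n: n["metadata"]["input_session"])
--
--     # Collect nodes into ordered per-session buckets
--     session_buckets: dict[int, list] = {}
--     for node in sorted_nodes:
--         sid = node["metadata"]["input_session"]
--         if sid not in session_buckets:
--             session_buckets[sid] = []
--         session_buckets[sid].append(node)
--
--     # Chunk the buckets and flatten each chunk into one group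
--     ordered = list(session_buckets.values())
--     groups = []
--     for i in range(0, len(ordered), session_number):
--         chunk = ordered[i : i + session_number]
--         groups.append([node for session in chunk for node in session])
--
--     return groups
-- ===== SOURCE B (Python) =====
-- def _split_by_session(nodes: list, session_number: int) -> list:
--     if session_number < 1:
--         raise ValueError(f"session_number must be >= 1; got {session_number}.")
--
--     missing = [i for i, n in enumerate(nodes) if "input_session" not in n.get("metadata", {})]
--     if missing:
--         raise ValueError(f"Nodes at indices {missing} are missing 'input_session' in metadata.")
--
--     # No dict, no bucketing, no sort of the node list: sort only the distinct
--     # session ids, then repeatedly slice off the next `session_number` ids and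
--     # build each group by filtering the original node list per session id
--     # (original order within a session is preserved by the filter).
--     ids = sorted({n["metadata"]["input_session"] for n in nodes})
--     groups = []
--     while ids:
--         take, ids = ids[:session_number], ids[session_number:]
--         groups.append([n for s in take for n in nodes
--                       if n["metadata"]["input_session"] == s])
--     return groups
-- ===== Notes on version B (the rewrite author's own statement) =====
-- stated objective: alternative
-- what changed: B keeps A's two guards but drops the sort-nodes/bucket-dict/chunk-by-index pipeline entirely: it sorts only the distinct session ids, then a while loop slices off the next session_number ids and builds each group by filtering the original node list per session id (no dict, no sort of the nodes).
import Mathlib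
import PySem

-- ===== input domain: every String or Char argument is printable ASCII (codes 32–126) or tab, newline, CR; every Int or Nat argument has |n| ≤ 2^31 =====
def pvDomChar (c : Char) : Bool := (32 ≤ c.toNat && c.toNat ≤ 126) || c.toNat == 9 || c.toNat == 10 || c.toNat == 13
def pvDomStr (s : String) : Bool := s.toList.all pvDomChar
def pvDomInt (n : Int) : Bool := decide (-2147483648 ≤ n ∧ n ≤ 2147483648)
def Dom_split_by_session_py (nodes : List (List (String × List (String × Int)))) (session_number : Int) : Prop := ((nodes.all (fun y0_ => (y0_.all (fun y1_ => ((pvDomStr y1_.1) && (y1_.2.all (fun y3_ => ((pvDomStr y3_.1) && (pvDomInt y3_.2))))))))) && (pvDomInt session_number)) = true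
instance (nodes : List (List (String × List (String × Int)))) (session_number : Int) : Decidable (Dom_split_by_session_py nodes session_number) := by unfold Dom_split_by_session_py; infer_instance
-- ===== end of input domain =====

-- ===== PORT A =====
-- B drops A's sort/bucket-dict/index-chunk pipeline: it sorts only the distinct session
-- ids and builds each group by re-filtering the original node list (objective: alternative).
-- Session id of a node: node["metadata"]["input_session"]; ports read it with getD defaults,
-- exact under Pre_ (which guarantees both keys are present, as A's guard checks).
def pvSid (n : List (String × List (String × Int))) : Int :=
  (PySem.Dict.mk ((PySem.Dict.mk n).getD "metadata" [])).getD "input_session" 0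

-- missing = [i for i, n in enumerate(nodes) if "input_session" not in n.get("metadata", {})]
def pvMissing (nodes : List (List (String × List (String × Int)))) : List Int :=
  ((PySem.List.enumerate nodes).filter
    (fun p => !(PySem.Dict.mk ((PySem.Dict.mk p.2).getD "metadata" [])).contains "input_session")).map (fun p => p.1)

-- A's bucket loop: if sid not in d: d[sid] = [];  d[sid].append(node)
def pvBucketsA (nodes : List (List (String × List (String × Int)))) :
    PySem.Dict Int (List (List (String × List (String × Int)))) :=
  (PySem.List.sorted nodes pvSid).foldl (fun d node =>
    (if d.contains (pvSid node) then d else d.insert (pvSid node) []).modify (pvSid node) []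
      (fun l => l ++ [node])) PySem.Dict.empty

-- A's chunk loop: for i in range(0, len(ordered), session_number): groups.append(flattened chunk)
def pvChunksA (ordered : List (List (List (String × List (String × Int))))) (session_number : Int) :
    List (List (List (String × List (String × Int)))) :=
  (PySem.List.pyRange 0 (ordered.length : Int) session_number).foldl
    (fun groups i => groups ++
      [(PySem.List.slice ordered (some i) (some (i + session_number))).flatMap (fun s => s)]) []

def split_by_session_py (nodes : List (List (String × List (String × Int)))) (session_number : Int) : List (List (List (String × List (String × Int)))) :=
  if session_number < 1 then []  -- raise ValueError (excluded by Pre_)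
  else if pvMissing nodes ≠ [] then []  -- raise ValueError (excluded by Pre_)
  else pvChunksA (pvBucketsA nodes).values session_number

-- ===== PORT B =====
-- ids = sorted({n["metadata"]["input_session"] for n in nodes})
def pvIdsB (nodes : List (List (String × List (String × Int)))) : List Int :=
  PySem.List.sorted (PySem.Set.ofList (nodes.map pvSid)) (fun k => k)

-- while ids: take, ids = ids[:k], ids[k:]; groups.append([n for s in take for n in nodes if sid(n)==s])
-- fuel = ids.length is a totality guard only: with k ≥ 1 each iteration strictly shortens ids.
def pvLoopB {α : Type} (f : Int → List α) (k : Int) : Nat → List Int → List (List α)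
  | 0, _ => []
  | fuel+1, ids =>
    if ids = [] then []
    else ((PySem.List.slice ids none (some k)).flatMap f)
         :: pvLoopB f k fuel (PySem.List.slice ids (some k) none)

def split_by_session_py_alt (nodes : List (List (String × List (String × Int)))) (session_number : Int) : List (List (List (String × List (String × Int)))) :=
  if session_number < 1 then []  -- raise ValueError (excluded by Pre_)
  else if pvMissing nodes ≠ [] then []  -- raise ValueError (excluded by Pre_)
  else pvLoopB (fun s => nodes.filter (fun n => pvSid n == s)) session_number
         (pvIdsB nodes).length (pvIdsB nodes)

-- ===== PRECONDITION & SPEC =====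
-- A raises ValueError when session_number < 1 or when some node lacks metadata["input_session"];
-- exactly those inputs are excluded.
def Pre_split_by_session_py (nodes : List (List (String × List (String × Int)))) (session_number : Int) : Prop :=
  1 ≤ session_number ∧ ∀ n ∈ nodes,
    (PySem.Dict.mk ((PySem.Dict.mk n).getD "metadata" [])).contains "input_session" = true
instance (nodes : List (List (String × List (String × Int)))) (session_number : Int) : Decidable (Pre_split_by_session_py nodes session_number) := by unfold Pre_split_by_session_py; infer_instance
def pvWitness_split_by_session_py : (List (List (String × List (String × Int)))) × Int :=
  ([[("metadata", [("input_session", 2)])], [("metadata", [("input_session", 1)])]], 1)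
def Spec_split_by_session_py (nodes : List (List (String × List (String × Int)))) (session_number : Int) (out : List (List (List (String × List (String × Int))))) : Prop := out = split_by_session_py_alt nodes session_number
instance (nodes : List (List (String × List (String × Int)))) (session_number : Int) (out : List (List (List (String × List (String × Int))))) : Decidable (Spec_split_by_session_py nodes session_number out) := by unfold Spec_split_by_session_py; infer_instance

-- ===== CLAIM (what is proved, stated in full; the proofs are below) =====
def Claim_equal_split_by_session_py : Prop := ∀ (nodes : List (List (String × List (String × Int)))) (session_number : Int), Dom_split_by_session_py nodes session_number → Pre_split_by_session_py nodes session_number → Spec_split_by_session_py nodes session_number (split_by_session_py nodes session_number)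

-- ===== LEMMAS AND PROOFS =====

-- the two mutations in A's bucket step collapse to one modify
theorem pv_step_modify {nu : Type} (d : PySem.Dict Int nu) (k : Int) (v0 : nu) (f : nu → nu) :
    (if d.contains k then d else d.insert k v0).modify k v0 f = d.modify k v0 f := by
  by_cases hc : d.contains k
  · rw [if_pos hc]
  · rw [if_neg hc]
    rw [Bool.not_eq_true] at hc
    have hany : (d.items.any fun p => p.1 == k) = false := by
      simpa [PySem.Dict.contains] using hc
    have hmem : ∀ p ∈ d.items, (p.1 == k) = false := by
      intro p hp
      have := List.any_eq_false.mp hany p hp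
      simpa using this
    unfold PySem.Dict.modify
    rw [PySem.Dict.getD_insert_self, PySem.Dict.getD_of_not_contains d v0 hc]
    apply PySem.Dict.ext
    have hmap : d.items.map (fun p => if p.1 = k then (k, f v0) else p) = d.items := by
      have hcongr : ∀ p ∈ d.items, (if p.1 = k then (k, f v0) else p) = id p := by
        intro p hp
        have : p.1 ≠ k := by simpa using hmem p hp
        simp [this]
      rw [List.map_congr_left hcongr, List.map_id]
    simp [PySem.Dict.insert, PySem.Dict.contains, hany, hmap]

-- dedup is a sublist
theorem pv_ofList_sublist {α : Type} [BEq α] [LawfulBEq α] (l : List α) :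
    (PySem.Set.ofList l).Sublist l := by
  induction l with
  | nil => simp [PySem.Set.ofList]
  | cons x xs ih =>
    rw [PySem.Set.ofList_cons]
    exact List.Sublist.cons₂ x ((by simpa [PySem.Set.discard] using List.filter_sublist.trans ih))

-- stability: filtering one key class commutes with inserting into a sorted list
theorem pv_filter_insertBy {α : Type} (key : α → Int) (c : Int) (x : α) (acc : List α)
    (h : acc.Pairwise (fun a b => key a ≤ key b)) :
    (PySem.List.insertBy (fun a b => decide (key a < key b)) x acc).filter (fun y => key y == c)
      = acc.filter (fun y => key y == c) ++ (if key x == c then [x] else []) := by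
  induction acc with
  | nil =>
    by_cases hx : key x == c <;> simp [PySem.List.insertBy, hx]
  | cons y ys ih =>
    rw [List.pairwise_cons] at h
    by_cases hlt : key x < key y
    · rw [show PySem.List.insertBy (fun a b => decide (key a < key b)) x (y :: ys)
            = x :: y :: ys by simp [PySem.List.insertBy, hlt]]
      by_cases hx : (key x == c) = true
      · have hcy : c < key y := by
          have hxc : key x = c := by simpa using hx
          omega
        have hnil : (y :: ys).filter (fun z => key z == c) = [] := by
          rw [List.filter_eq_nil_iff]
          intro z hz
          have hyz : key y ≤ key z := by
            rcases List.mem_cons.mp hz with rfl | hz2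
            · exact le_refl _
            · exact h.1 z hz2
          simp only [beq_iff_eq]
          omega
        simp [hx, hnil]
      · simp [List.filter_cons, hx]
    · rw [show PySem.List.insertBy (fun a b => decide (key a < key b)) x (y :: ys)
            = y :: PySem.List.insertBy (fun a b => decide (key a < key b)) x ys by
          simp [PySem.List.insertBy, hlt]]
      rw [List.filter_cons, List.filter_cons, ih h.2]
      by_cases hy : key y == c <;> simp [hy]

theorem pv_insertBy_pairwise {α : Type} (key : α → Int) (x : α) (acc : List α)
    (h : acc.Pairwise (fun a b => key a ≤ key b)) :
    (PySem.List.insertBy (fun a b => decide (key a < key b)) x acc).Pairwise (fun a b => key a ≤ key b) := by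
  induction acc with
  | nil => simp [PySem.List.insertBy]
  | cons y ys ih =>
    rw [List.pairwise_cons] at h
    by_cases hlt : key x < key y
    · rw [show PySem.List.insertBy (fun a b => decide (key a < key b)) x (y :: ys)
            = x :: y :: ys by simp [PySem.List.insertBy, hlt]]
      rw [List.pairwise_cons]
      constructor
      · intro z hz
        rcases List.mem_cons.mp hz with rfl | hz2
        · exact le_of_lt hlt
        · exact le_of_lt (lt_of_lt_of_le hlt (h.1 z hz2))
      · rw [List.pairwise_cons]; exact h
    · rw [show PySem.List.insertBy (fun a b => decide (key a < key b)) x (y :: ys)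
            = y :: PySem.List.insertBy (fun a b => decide (key a < key b)) x ys by
          simp [PySem.List.insertBy, hlt]]
      rw [List.pairwise_cons]
      constructor
      · intro z hz
        rw [PySem.List.mem_insertBy] at hz
        rcases hz with rfl | hz2
        · exact le_of_not_gt hlt
        · exact h.1 z hz2
      · exact ih h.2

theorem pv_filter_foldl_insertBy {α : Type} (key : α → Int) (c : Int) (xs : List α) :
    ∀ acc, acc.Pairwise (fun a b => key a ≤ key b) →
    (xs.foldl (fun acc x => PySem.List.insertBy (fun a b => decide (key a < key b)) x acc) acc).filter (fun y => key y == c)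
      = acc.filter (fun y => key y == c) ++ xs.filter (fun y => key y == c) := by
  induction xs with
  | nil => intro acc _; simp
  | cons x xs ih =>
    intro acc h
    simp only [List.foldl_cons]
    rw [ih _ (pv_insertBy_pairwise key x acc h), pv_filter_insertBy key c x acc h]
    rw [List.filter_cons]
    by_cases hx : key x == c <;> simp [hx]

-- filtering one key class commutes with PySem's stable sort
theorem pv_filter_sorted {α : Type} (key : α → Int) (c : Int) (xs : List α) :
    (PySem.List.sorted xs key).filter (fun y => key y == c) = xs.filter (fun y => key y == c) := by
  rw [PySem.List.sorted_eq_foldl_insertBy]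
  simpa using pv_filter_foldl_insertBy key c xs [] (by simp)

-- the bucket dict built by a modify-append loop: lookup is a filter of the traversed list
theorem pv_getD_buckets {α : Type} (key : α → Int) (l : List α) (c : Int) :
    (l.foldl (fun d node => d.modify (key node) [] (fun t => t ++ [node])) PySem.Dict.empty).getD c []
      = l.filter (fun n => key n == c) := by
  have h := PySem.Dict.getD_foldl_modify_append (l.map (fun n => ((key n), n))) PySem.Dict.empty c
  rw [List.foldl_map] at h
  simp only [List.filter_map, Function.comp_def, List.map_map] at h
  simpa [PySem.Dict.getD_empty] using h

theorem pv_keys_buckets {α : Type} (key : α → Int) (l : List α) :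
    (l.foldl (fun d node => d.modify (key node) [] (fun t => t ++ [node])) PySem.Dict.empty).keys
      = PySem.Set.ofList (l.map key) := by
  rw [PySem.Dict.keys_foldl_modify_key l key [] (fun _ node => fun t => t ++ [node])]
  simp [PySem.Dict.keys_empty, PySem.Set.update_nil_left]

-- sorted distinct keys: dedup of the key-sorted keys = sort of the dedup'd keys
theorem pv_ofList_sorted {α : Type} (key : α → Int) (xs : List α) :
    PySem.Set.ofList ((PySem.List.sorted xs key).map key)
      = PySem.List.sorted (PySem.Set.ofList (xs.map key)) (fun k => k) := by
  refine (PySem.List.sorted_eq_of_perm_of_pairwise_lt _ _ _ ?_ ?_).symm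
  · rw [List.perm_ext_iff_of_nodup (PySem.Set.nodup_ofList _) (PySem.Set.nodup_ofList _)]
    intro a
    simp [PySem.Set.mem_ofList, PySem.List.mem_sorted]
  · have hle : (PySem.Set.ofList ((PySem.List.sorted xs key).map key)).Pairwise (fun a b => a ≤ b) :=
      List.Pairwise.sublist (pv_ofList_sublist _) (PySem.List.sorted_map_key_pairwise xs key)
    have hnd : (PySem.Set.ofList ((PySem.List.sorted xs key).map key)).Pairwise (fun a b => a ≠ b) :=
      PySem.Set.nodup_ofList _
    exact (hle.and hnd).imp (fun hab => lt_of_le_of_ne hab.1 hab.2)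

-- A's ordered bucket list = the per-id filters of the original list, over the sorted distinct ids
theorem pv_values_eq (nodes : List (List (String × List (String × Int)))) :
    (pvBucketsA nodes).values
      = (pvIdsB nodes).map (fun c => nodes.filter (fun n => pvSid n == c)) := by
  unfold pvBucketsA pvIdsB
  have hstep : (fun (d : PySem.Dict Int (List (List (String × List (String × Int))))) node =>
      (if d.contains (pvSid node) then d else d.insert (pvSid node) []).modify (pvSid node) []
        (fun l => l ++ [node]))
      = (fun d node => d.modify (pvSid node) [] (fun l => l ++ [node])) := by
    funext d node
    exact pv_step_modify d (pvSid node) [] (fun l => l ++ [node])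
  rw [hstep]
  have hnodup : ((PySem.List.sorted nodes pvSid).foldl
      (fun d node => d.modify (pvSid node) [] (fun l => l ++ [node])) PySem.Dict.empty).keys.Nodup := by
    apply PySem.Dict.nodup_keys_foldl_modify_key _ pvSid [] (fun _ node => fun l => l ++ [node])
    simp [PySem.Dict.keys_empty]
  rw [PySem.Dict.values_eq_map_keys _ hnodup []]
  rw [pv_keys_buckets pvSid (PySem.List.sorted nodes pvSid), pv_ofList_sorted pvSid nodes]
  apply List.map_congr_left
  intro c _
  rw [pv_getD_buckets pvSid (PySem.List.sorted nodes pvSid) c, pv_filter_sorted pvSid c nodes]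

-- A's append loop over the range as a map over the same range
theorem pv_chunksA_eq_map (ordered : List (List (List (String × List (String × Int))))) (sn : Int) :
    pvChunksA ordered sn
      = (PySem.List.pyRange 0 (ordered.length : Int) sn).map
          (fun i => (PySem.List.slice ordered (some i) (some (i + sn))).flatMap (fun s => s)) := by
  unfold pvChunksA
  rw [PySem.List.foldl_append_eq_flatMap]
  rw [List.nil_append]
  induction (PySem.List.pyRange 0 (ordered.length : Int) sn) with
  | nil => rfl
  | cons i is ih => rw [List.flatMap_cons, List.map_cons, ← ih]; rfl

-- a positive-step range from 0 is empty for a nonpositive stop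
theorem pv_pyRange_pos_nil (b k : Int) (hk : 0 < k) (hb : b ≤ 0) :
    PySem.List.pyRange 0 b k = [] := by
  rw [PySem.List.pyRange_of_pos _ _ hk, if_neg (by omega : ¬ (0:Int) < b)]
  simp

-- peel the first index off a positive-step range from 0, shifting the rest
theorem pv_pyRange_pos_cons (b k : Int) (hk : 0 < k) (hb : 0 < b) :
    PySem.List.pyRange 0 b k = 0 :: (PySem.List.pyRange 0 (b - k) k).map (· + k) := by
  rw [PySem.List.pyRange_of_pos _ _ hk, PySem.List.pyRange_of_pos _ _ hk, if_pos hb]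
  by_cases hbk : k < b
  · rw [if_pos (by omega : (0:Int) < b - k)]
    have harith : b - 0 + k - 1 = (b - k - 0 + k - 1) + 1 * k := by ring
    have hstep : (b - 0 + k - 1) / k = (b - k - 0 + k - 1) / k + 1 := by
      rw [harith, Int.add_mul_ediv_right _ _ (by omega : k ≠ 0)]
    have hnn : 0 ≤ (b - k - 0 + k - 1) / k := Int.ediv_nonneg (by omega) (by omega)
    have htn : ((b - k - 0 + k - 1) / k + 1).toNat = ((b - k - 0 + k - 1) / k).toNat + 1 := by omega
    rw [hstep, htn, List.range_succ_eq_map]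
    simp only [List.map_cons, List.map_map]
    refine congrArg₂ _ (by ring) ?_
    apply List.map_congr_left
    intro j _
    simp only [Function.comp_apply]
    push_cast
    ring
  · rw [if_neg (by omega : ¬ (0:Int) < b - k)]
    have h1 : (b - 0 + k - 1) / k = 1 := by
      rw [← PySem.Int.floordiv_eq_ediv_of_pos hk,
        PySem.Int.floordiv_eq_iff_of_pos hk]
      constructor <;> nlinarith
    rw [h1]
    simp

-- the index-range chunking of a mapped bucket list equals B's slice-off loop
theorem pv_chunks_eq_loop {α : Type} (f : Int → List α) (k : Int) (hk : 0 < k) :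
    ∀ (fuel : Nat) (ids : List Int), ids.length ≤ fuel →
    (PySem.List.pyRange 0 (((ids.map f).length : Nat) : Int) k).map
      (fun i => (PySem.List.slice (ids.map f) (some i) (some (i + k))).flatMap (fun s => s))
    = pvLoopB f k fuel ids := by
  intro fuel
  induction fuel with
  | zero =>
    intro ids hlen
    have : ids = [] := List.length_eq_zero_iff.mp (Nat.le_zero.mp hlen)
    subst this
    simp [pvLoopB, pv_pyRange_pos_nil 0 k hk le_rfl]
  | succ fuel ih =>
    intro ids hlen
    by_cases hids : ids = []
    · subst hids
      simp [pvLoopB, pv_pyRange_pos_nil 0 k hk le_rfl]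
    · have hpos : 0 < ids.length := List.length_pos_iff.mpr hids
      rw [pvLoopB, if_neg hids]
      rw [List.length_map, pv_pyRange_pos_cons _ k hk (by exact_mod_cast hpos)]
      rw [List.map_cons, List.map_map]
      have hdrop : PySem.List.slice ids (some k) none = ids.drop k.toNat :=
        PySem.List.slice_from ids (le_of_lt hk)
      refine congrArg₂ _ ?_ ?_
      · -- head: ordered[0:k] flattened = take of ids, mapped and flattened
        rw [show (0:Int) + k = k by ring]
        rw [PySem.List.slice_zero_start, PySem.List.slice_to _ (le_of_lt hk),
          PySem.List.slice_to _ (le_of_lt hk)]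
        rw [← List.map_take, List.flatMap_map]
      · -- tail: shifted range over the dropped ids
        have hlen' : (ids.drop k.toNat).length ≤ fuel := by
          rw [List.length_drop]
          omega
        rw [hdrop, ← ih (ids.drop k.toNat) hlen']
        have hb : ((ids.length : Int) - k)
            = (((ids.drop k.toNat).length : Nat) : Int) ∨ ((ids.length : Int) - k ≤ 0 ∧ (ids.drop k.toNat).length = 0) := by
          rw [List.length_drop]
          by_cases hkb : k ≤ (ids.length : Int)
          · left; omega
          · right; constructor <;> omega
        have hrange : PySem.List.pyRange 0 ((ids.length : Int) - k) k
            = PySem.List.pyRange 0 ((((ids.drop k.toNat).map f).length : Nat) : Int) k := by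
          rw [List.length_map]
          rcases hb with h | ⟨h1, h2⟩
          · rw [h]
          · rw [pv_pyRange_pos_nil _ k hk h1, h2]
            simp [pv_pyRange_pos_nil 0 k hk le_rfl]
        rw [hrange]
        apply List.map_congr_left
        intro i hi
        have hi0 : 0 ≤ i := by
          rcases (PySem.List.mem_pyRange_iff_of_pos hk i).mp hi with ⟨h1, _, _⟩
          exact h1
        simp only [Function.comp_apply]
        have hs1 : PySem.List.slice (ids.map f) (some (i + k)) (some (i + k + k))
            = ((ids.map f).drop (i + k).toNat).take ((i + k + k).toNat - (i + k).toNat) :=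
          PySem.List.slice_toNat _ (by omega) (by omega)
        have hs2 : PySem.List.slice ((ids.drop k.toNat).map f) (some i) (some (i + k))
            = (((ids.drop k.toNat).map f).drop i.toNat).take ((i + k).toNat - i.toNat) :=
          PySem.List.slice_toNat _ (by omega) (by omega)
        rw [hs1, hs2, ← List.map_drop, ← List.map_drop, List.drop_drop]
        have h3 : k.toNat + i.toNat = (i + k).toNat := by omega
        have h4 : (i + k + k).toNat - (i + k).toNat = (i + k).toNat - i.toNat := by omega
        rw [h3, h4]

-- ===== VERDICT (by name: the statement is the Claim_ definition above) =====
theorem split_by_session_py_spec : Claim_equal_split_by_session_py := by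
  intro nodes session_number _ hpre
  unfold Spec_split_by_session_py split_by_session_py split_by_session_py_alt
  by_cases h1 : session_number < 1
  · rw [if_pos h1, if_pos h1]
  · rw [if_neg h1, if_neg h1]
    by_cases h2 : pvMissing nodes ≠ []
    · rw [if_pos h2, if_pos h2]
    · rw [if_neg h2, if_neg h2, pv_chunksA_eq_map, pv_values_eq nodes]
      exact pv_chunks_eq_loop _ session_number (by omega) _ (pvIdsB nodes) le_rfl
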